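-- pv_equiv track=rewrite | github.com/MarkoYwirur/moh-assistant | internal/transliteration.py | transliterate_latin_armenian
-- ===== SOURCE A (Python) =====
-- LATIN_ARMENIAN_MAP = [
--     ("shch", "շճ"),
--     ("vo", "ո"),
--     ("ev", "և"),
--     ("ts", "ց"),
--     ("dz", "ձ"),
--     ("gh", "ղ"),
--     ("ch", "չ"),
--     ("sh", "շ"),
--     ("zh", "ժ"),
--     ("kh", "խ"),
--     ("th", "թ"),
--     ("ph", "փ"),
--     ("u", "ու")
-- ]
--
-- SINGLE_CHAR_MAP = {
--     "a": "ա",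
--     "b": "բ",
--     "g": "գ",
--     "d": "դ",
--     "e": "ե",
--     "z": "զ",
--     "i": "ի",
--     "l": "լ",
--     "x": "խ",
--     "c": "կ",
--     "h": "հ",
--     "j": "ջ",
--     "m": "մ",
--     "y": "յ",
--     "n": "ն",
--     "o": "ո",
--     "p": "պ",
--     "r": "ր",
--     "s": "ս",
--     "t": "տ",
--     "v": "վ",
--     "w": "վ",
--     "q": "ք",
--     "f": "ֆ"
-- }
--
-- COMMON_PHRASE_OVERRIDES = {
--     "ur dimem": "ուր դիմեմ",
--     "uxegir": "ուղեգիր",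
--     "stanalu hamar": "ստանալու համար",
--     "inch anem": "ինչ անեմ",
--     "degh": "դեղ",
--     "petutyun": "պետություն",
--     "anvjar": "անվճար",
--     "mrt": "մռտ",
--     "kt": "կտ",
--     "chi erevum": "չի երևում",
--     "armed": "արմեդ",
--     "mjerel en": "մերժել են",
--     "gumar": "գումար",
--     "vchar": "վճար",
--     "masnaget": "մասնագետ"
-- }
--
-- def transliterate_latin_armenian(text: str) -> str:
--     if not text:
--         return text
--
--     lowered = text.lower()
--
--     if not any("a" <= ch <= "z" for ch in lowered):
--         return text
--
--     for src, dst in COMMON_PHRASE_OVERRIDES.items():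
--         lowered = lowered.replace(src, dst)
--
--     result = []
--     i = 0
--     while i < len(lowered):
--         matched = False
--
--         for src, dst in LATIN_ARMENIAN_MAP:
--             if lowered[i:i+len(src)] == src:
--                 result.append(dst)
--                 i += len(src)
--                 matched = True
--                 break
--
--         if matched:
--             continue
--
--         ch = lowered[i]
--         if ch in SINGLE_CHAR_MAP:
--             result.append(SINGLE_CHAR_MAP[ch])
--         else:
--             result.append(ch)
--         i += 1
--
--     return "".join(result)
-- ===== SOURCE B (Python) =====
-- SINGLE_CHAR_MAP = {
--     "a": "ա", "b": "բ", "g": "գ", "d": "դ", "e": "ե", "z": "զ",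
--     "i": "ի", "l": "լ", "x": "խ", "c": "կ", "h": "հ", "j": "ջ",
--     "m": "մ", "y": "յ", "n": "ն", "o": "ո", "p": "պ", "r": "ր",
--     "s": "ս", "t": "տ", "v": "վ", "w": "վ", "q": "ք", "f": "ֆ"
-- }
--
-- COMMON_PHRASE_OVERRIDES = {
--     "ur dimem": "ուր դիմեմ",
--     "uxegir": "ուղեգիր",
--     "stanalu hamar": "ստանալու համար",
--     "inch anem": "ինչ անեմ",
--     "degh": "դեղ",
--     "petutyun": "պետություն",
--     "anvjar": "անվճար",
--     "mrt": "մռտ",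
--     "kt": "կտ",
--     "chi erevum": "չի երևում",
--     "armed": "արմեդ",
--     "mjerel en": "մերժել են",
--     "gumar": "գումար",
--     "vchar": "վճար",
--     "masnaget": "մասնագետ"
-- }
--
-- # B is a finite-state machine: one forward pass over the characters with a small
-- # pending-prefix state ("", one digraph-starting letter, "sh" or "shc"); no index
-- # arithmetic, no slicing lookahead, no per-position scan of the multigraph table.
-- DIGRAPHS = {"vo": "ո", "ev": "և", "ts": "ց", "dz": "ձ", "gh": "ղ", "ch": "չ",
--             "sh": "շ", "zh": "ժ", "kh": "խ", "th": "թ", "ph": "փ"}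
-- STARTERS = "vetdgcszkp"
--
--
-- def _emit1(s):
--     # what a lone pending piece transliterates to
--     return "ու" if s == "u" else SINGLE_CHAR_MAP.get(s, s)
--
--
-- def _step(state, c):
--     # consume one character; return (output, new pending state)
--     if state == "sh":
--         if c == "c":
--             return "", "shc"
--         out, st = _step("", c)
--         return "շ" + out, st
--     if state == "shc":
--         if c == "h":
--             return "շճ", ""
--         out, st = _step("c", c)
--         return "շ" + out, st
--     if state:
--         if state == "s" and c == "h":
--             return "", "sh"
--         d = DIGRAPHS.get(state + c)
--         if d is not None:
--             return d, ""
--         out, st = _step("", c)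
--         return _emit1(state) + out, st
--     if c in STARTERS:
--         return "", c
--     return _emit1(c), ""
--
--
-- def _flush(state):
--     if state == "sh":
--         return "շ"
--     if state == "shc":
--         return "շ" + _emit1("c")
--     return _emit1(state) if state else ""
--
--
-- def transliterate_latin_armenian(text: str) -> str:
--     if not text:
--         return text
--
--     lowered = text.lower()
--
--     if not any("a" <= ch <= "z" for ch in lowered):
--         return text
--
--     for src, dst in COMMON_PHRASE_OVERRIDES.items():
--         lowered = lowered.replace(src, dst)
--
--     out = []
--     state = ""
--     for ch in lowered:
--         piece, state = _step(state, ch)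
--         out.append(piece)
--     out.append(_flush(state))
--     return "".join(out)
-- ===== Notes on version B (the rewrite author's own statement) =====
-- stated objective: faster
-- what changed: A's index loop that slices a lookahead substring and linearly tries the whole LATIN_ARMENIAN_MAP at every position is replaced by a finite-state machine: one forward pass over the characters carrying a pending-prefix state ('', one digraph-starting letter, 'sh' or 'shc'), with no slicing and no per-position scan of the multigraph table.
import Mathlib
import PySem

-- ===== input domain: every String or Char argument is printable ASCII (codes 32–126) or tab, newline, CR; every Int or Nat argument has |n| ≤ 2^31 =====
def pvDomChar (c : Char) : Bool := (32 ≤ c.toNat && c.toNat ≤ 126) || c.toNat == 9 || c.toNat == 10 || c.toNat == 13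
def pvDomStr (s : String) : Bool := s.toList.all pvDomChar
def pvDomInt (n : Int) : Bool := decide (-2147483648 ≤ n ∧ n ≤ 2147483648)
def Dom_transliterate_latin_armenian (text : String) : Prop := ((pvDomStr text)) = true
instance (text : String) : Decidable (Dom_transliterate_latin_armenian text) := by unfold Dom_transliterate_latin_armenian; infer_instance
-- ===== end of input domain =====

-- B replaces A's slicing lookahead scan (which linearly tries LATIN_ARMENIAN_MAP at every
-- position) by a finite-state machine: one forward pass with a pending-prefix state
-- ('', one starting letter, "sh", "shc"); objective: faster (measured).


-- ===== PORT A =====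
def LATIN_ARMENIAN_MAP : List (List Char × List Char) :=
  [(['s','h','c','h'], ['շ','ճ']), (['v','o'], ['ո']), (['e','v'], ['և']),
   (['t','s'], ['ց']), (['d','z'], ['ձ']), (['g','h'], ['ղ']), (['c','h'], ['չ']),
   (['s','h'], ['շ']), (['z','h'], ['ժ']), (['k','h'], ['խ']), (['t','h'], ['թ']),
   (['p','h'], ['փ']), (['u'], ['ո','ւ'])]

def tryMap : List (List Char × List Char) → List Char → Option (List Char × Nat)
  | [], _ => none
  | (src, dst) :: rest, l =>
    if src = l.take src.length then some (dst, src.length) else tryMap rest l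

-- Python SINGLE_CHAR_MAP is keyed by one-character strings; keys here are the
-- corresponding one-character lists.
def SINGLE_CHAR_MAP : PySem.Dict (List Char) (List Char) :=
  PySem.Dict.mk [(['a'], ['ա']), (['b'], ['բ']), (['g'], ['գ']), (['d'], ['դ']), (['e'], ['ե']),
    (['z'], ['զ']), (['i'], ['ի']), (['l'], ['լ']), (['x'], ['խ']), (['c'], ['կ']), (['h'], ['հ']),
    (['j'], ['ջ']), (['m'], ['մ']), (['y'], ['յ']), (['n'], ['ն']), (['o'], ['ո']), (['p'], ['պ']),
    (['r'], ['ր']), (['s'], ['ս']), (['t'], ['տ']), (['v'], ['վ']), (['w'], ['վ']), (['q'], ['ք']),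
    (['f'], ['ֆ'])]

def loopA (l : List Char) : List (List Char) :=
  match l with
  | [] => []
  | ch :: rest =>
    match tryMap LATIN_ARMENIAN_MAP (ch :: rest) with
    | some (dst, n) =>
      -- i += len(src): every src in LATIN_ARMENIAN_MAP is nonempty, so the n matched
      -- chars are ch plus the first n-1 chars of rest
      dst :: loopA (rest.drop (n - 1))
    | none =>
      (match SINGLE_CHAR_MAP.get? [ch] with
       | some d => d
       | none => [ch]) :: loopA rest
termination_by l.length
decreasing_by
  · simp only [List.length_cons]
    have := List.length_drop (l := rest) (i := n - 1)
    omega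
  · simp

def COMMON_PHRASE_OVERRIDES : List (List Char × List Char) :=
  [("ur dimem".toList, "ուր դիմեմ".toList), ("uxegir".toList, "ուղեգիր".toList),
   ("stanalu hamar".toList, "ստանալու համար".toList), ("inch anem".toList, "ինչ անեմ".toList),
   ("degh".toList, "դեղ".toList), ("petutyun".toList, "պետություն".toList),
   ("anvjar".toList, "անվճար".toList), ("mrt".toList, "մռտ".toList), ("kt".toList, "կտ".toList),
   ("chi erevum".toList, "չի երևում".toList), ("armed".toList, "արմեդ".toList),
   ("mjerel en".toList, "մերժել են".toList), ("gumar".toList, "գումար".toList),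
   ("vchar".toList, "վճար".toList), ("masnaget".toList, "մասնագետ".toList)]

def transliterate_latin_armenian (text : String) : String :=
  if PySem.Str.len text = 0 then text
  else
    let lowered := PySem.Chars.lower text.toList
    if lowered.any (fun ch => 'a' ≤ ch && ch ≤ 'z') = false then text
    else
      let replaced := COMMON_PHRASE_OVERRIDES.foldl
        (fun acc p => PySem.Chars.replace acc p.1 p.2) lowered
      String.ofList (PySem.Chars.join [] (loopA replaced))

-- ===== PORT B =====
def DIGRAPHS : PySem.Dict (List Char) (List Char) :=
  PySem.Dict.mk [(['v','o'], ['ո']), (['e','v'], ['և']), (['t','s'], ['ց']), (['d','z'], ['ձ']),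
    (['g','h'], ['ղ']), (['c','h'], ['չ']), (['s','h'], ['շ']), (['z','h'], ['ժ']),
    (['k','h'], ['խ']), (['t','h'], ['թ']), (['p','h'], ['փ'])]

def STARTERS : List Char := ['v','e','t','d','g','c','s','z','k','p']

def emit1 (s : List Char) : List Char :=
  if s = ['u'] then ['ո','ւ']
  else match SINGLE_CHAR_MAP.get? s with
    | some d => d
    | none => s

def stepB : List Char → Char → List Char × List Char
  | ['s','h'], c =>
    if c = 'c' then ([], ['s','h','c'])
    else ('շ' :: (stepB [] c).1, (stepB [] c).2)
  | ['s','h','c'], c =>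
    if c = 'h' then (['շ','ճ'], [])
    else ('շ' :: (stepB ['c'] c).1, (stepB ['c'] c).2)
  | [], c =>
    if c ∈ STARTERS then ([], [c]) else (emit1 [c], [])
  | p :: ps, c =>
    if p :: ps = ['s'] ∧ c = 'h' then ([], ['s','h'])
    else match DIGRAPHS.get? ((p :: ps) ++ [c]) with
      | some d => (d, [])
      | none => (emit1 (p :: ps) ++ (stepB [] c).1, (stepB [] c).2)
termination_by st _ => st.length

def flushB (state : List Char) : List Char :=
  if state = ['s','h'] then ['շ']
  else if state = ['s','h','c'] then 'շ' :: emit1 ['c']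
  else if state = [] then [] else emit1 state

def runB : List Char → List Char → List Char
  | state, [] => flushB state
  | state, c :: rest => (stepB state c).1 ++ runB (stepB state c).2 rest

def transliterate_latin_armenian_alt (text : String) : String :=
  if PySem.Str.len text = 0 then text
  else
    let lowered := PySem.Chars.lower text.toList
    if lowered.any (fun ch => 'a' ≤ ch && ch ≤ 'z') = false then text
    else
      let replaced := COMMON_PHRASE_OVERRIDES.foldl
        (fun acc p => PySem.Chars.replace acc p.1 p.2) lowered
      String.ofList (runB [] replaced)

-- ===== PRECONDITION & SPEC =====
def Spec_transliterate_latin_armenian (text : String) (out : String) : Prop :=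
  out = transliterate_latin_armenian_alt text
instance (text : String) (out : String) : Decidable (Spec_transliterate_latin_armenian text out) := by
  unfold Spec_transliterate_latin_armenian; infer_instance

-- ===== CLAIM =====
def Claim_equal_transliterate_latin_armenian : Prop := ∀ (text : String),
  Dom_transliterate_latin_armenian text →
    Spec_transliterate_latin_armenian text (transliterate_latin_armenian text)

-- ===== LEMMAS AND PROOFS =====
lemma join_nil_flatten : ∀ parts : List (List Char), PySem.Chars.join [] parts = parts.flatten := by
  intro parts
  induction parts with
  | nil => rfl
  | cons a rest ih =>
    cases rest with
    | nil => simp [PySem.Chars.join, List.intercalate]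
    | cons b r =>
      rw [PySem.Chars.join_cons_cons, ih]
      simp

lemma get?_mk_nil {κ ν : Type} [BEq κ] (k : κ) : (PySem.Dict.mk ([] : List (κ × ν))).get? k = none := rfl

lemma dig_eq (p c : Char) : DIGRAPHS.get? [p, c] =
    if 'v' = p ∧ 'o' = c then some ['ո'] else if 'e' = p ∧ 'v' = c then some ['և']
    else if 't' = p ∧ 's' = c then some ['ց'] else if 'd' = p ∧ 'z' = c then some ['ձ']
    else if 'g' = p ∧ 'h' = c then some ['ղ'] else if 'c' = p ∧ 'h' = c then some ['չ']
    else if 's' = p ∧ 'h' = c then some ['շ'] else if 'z' = p ∧ 'h' = c then some ['ժ']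
    else if 'k' = p ∧ 'h' = c then some ['խ'] else if 't' = p ∧ 'h' = c then some ['թ']
    else if 'p' = p ∧ 'h' = c then some ['փ'] else none := by
  simp only [DIGRAPHS, PySem.Dict.get?_mk_cons, get?_mk_nil, beq_iff_eq, List.cons.injEq,
    and_true]

lemma tryMap_one (a : Char) : tryMap LATIN_ARMENIAN_MAP [a] =
    if 'u' = a then some (['ո', 'ւ'], 1) else none := by
  simp only [tryMap, LATIN_ARMENIAN_MAP, List.length_cons, List.length_nil, List.take_succ_cons,
    List.take_nil, List.cons.injEq, and_true, reduceCtorEq, and_false,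
    Nat.reduceAdd, ite_false]

lemma tryMap_two (p c : Char) (rest : List Char) (h : ¬('s' = p ∧ 'h' = c)) :
    tryMap LATIN_ARMENIAN_MAP (p :: c :: rest) =
    if 'v' = p ∧ 'o' = c then some (['ո'], 2) else if 'e' = p ∧ 'v' = c then some (['և'], 2)
    else if 't' = p ∧ 's' = c then some (['ց'], 2) else if 'd' = p ∧ 'z' = c then some (['ձ'], 2)
    else if 'g' = p ∧ 'h' = c then some (['ղ'], 2) else if 'c' = p ∧ 'h' = c then some (['չ'], 2)
    else if 'z' = p ∧ 'h' = c then some (['ժ'], 2) else if 'k' = p ∧ 'h' = c then some (['խ'], 2)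
    else if 't' = p ∧ 'h' = c then some (['թ'], 2) else if 'p' = p ∧ 'h' = c then some (['փ'], 2)
    else if 'u' = p then some (['ո', 'ւ'], 1) else none := by
  simp only [tryMap, LATIN_ARMENIAN_MAP, List.length_cons, List.length_nil, List.take_succ_cons,
    List.take_zero, List.cons.injEq, and_true, Nat.reduceAdd]
  rw [if_neg (fun hh => h ⟨hh.1, hh.2.1⟩), if_neg h]

lemma tryMap_digOr (p c : Char) (rest : List Char) (h : ¬('s' = p ∧ 'h' = c)) :
    tryMap LATIN_ARMENIAN_MAP (p :: c :: rest) =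
    match DIGRAPHS.get? [p, c] with
    | some d => some (d, 2)
    | none => if 'u' = p then some (['ո', 'ւ'], 1) else none := by
  rw [tryMap_two p c rest h, dig_eq]
  by_cases h1 : 'v' = p ∧ 'o' = c
  · rw [if_pos h1, if_pos h1]
  · rw [if_neg h1, if_neg h1]
    by_cases h2 : 'e' = p ∧ 'v' = c
    · rw [if_pos h2, if_pos h2]
    · rw [if_neg h2, if_neg h2]
      by_cases h3 : 't' = p ∧ 's' = c
      · rw [if_pos h3, if_pos h3]
      · rw [if_neg h3, if_neg h3]
        by_cases h4 : 'd' = p ∧ 'z' = c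
        · rw [if_pos h4, if_pos h4]
        · rw [if_neg h4, if_neg h4]
          by_cases h5 : 'g' = p ∧ 'h' = c
          · rw [if_pos h5, if_pos h5]
          · rw [if_neg h5, if_neg h5]
            by_cases h6 : 'c' = p ∧ 'h' = c
            · rw [if_pos h6, if_pos h6]
            · rw [if_neg h6, if_neg h6, if_neg h]
              by_cases h7 : 'z' = p ∧ 'h' = c
              · rw [if_pos h7, if_pos h7]
              · rw [if_neg h7, if_neg h7]
                by_cases h8 : 'k' = p ∧ 'h' = c
                · rw [if_pos h8, if_pos h8]
                · rw [if_neg h8, if_neg h8]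
                  by_cases h9 : 't' = p ∧ 'h' = c
                  · rw [if_pos h9, if_pos h9]
                  · rw [if_neg h9, if_neg h9]
                    by_cases h10 : 'p' = p ∧ 'h' = c
                    · rw [if_pos h10, if_pos h10]
                    · rw [if_neg h10, if_neg h10]

lemma tryMap_of_dig (p c : Char) (rest : List Char) (d : List Char) (h : ¬('s' = p ∧ 'h' = c))
    (hd : DIGRAPHS.get? [p, c] = some d) :
    tryMap LATIN_ARMENIAN_MAP (p :: c :: rest) = some (d, 2) := by
  rw [tryMap_digOr p c rest h, hd]

lemma tryMap_of_nodig (p c : Char) (rest : List Char) (h : ¬('s' = p ∧ 'h' = c))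
    (hd : DIGRAPHS.get? [p, c] = none) :
    tryMap LATIN_ARMENIAN_MAP (p :: c :: rest) =
      if 'u' = p then some (['ո', 'ւ'], 1) else none := by
  rw [tryMap_digOr p c rest h, hd]

lemma tryMap_sh (c : Char) (rest : List Char) (h : ¬('c' = c)) :
    tryMap LATIN_ARMENIAN_MAP ('s' :: 'h' :: c :: rest) = some (['շ'], 2) := by
  simp [tryMap, LATIN_ARMENIAN_MAP, h]

lemma tryMap_shch (rest : List Char) :
    tryMap LATIN_ARMENIAN_MAP ('s' :: 'h' :: 'c' :: 'h' :: rest) = some (['շ', 'ճ'], 4) := by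
  simp [tryMap, LATIN_ARMENIAN_MAP]

lemma tryMap_shc (c : Char) (rest : List Char) (h : ¬('h' = c)) :
    tryMap LATIN_ARMENIAN_MAP ('s' :: 'h' :: 'c' :: c :: rest) = some (['շ'], 2) := by
  simp [tryMap, LATIN_ARMENIAN_MAP, h]

lemma tryMap_head (c : Char) (rest : List Char) (h : c ∉ STARTERS) :
    tryMap LATIN_ARMENIAN_MAP (c :: rest) = if 'u' = c then some (['ո', 'ւ'], 1) else none := by
  simp only [STARTERS, List.mem_cons, List.not_mem_nil, or_false, not_or] at h
  obtain ⟨h1, h2, h3, h4, h5, h6, h7, h8, h9, h10⟩ := h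
  simp only [tryMap, LATIN_ARMENIAN_MAP, List.length_cons, List.length_nil, List.take_succ_cons,
    List.take_zero, List.cons.injEq, and_true, Nat.reduceAdd]
  rw [if_neg (fun hh => h7 hh.1.symm), if_neg (fun hh => h1 hh.1.symm),
      if_neg (fun hh => h2 hh.1.symm), if_neg (fun hh => h3 hh.1.symm),
      if_neg (fun hh => h4 hh.1.symm), if_neg (fun hh => h5 hh.1.symm),
      if_neg (fun hh => h6 hh.1.symm), if_neg (fun hh => h7 hh.1.symm),
      if_neg (fun hh => h8 hh.1.symm), if_neg (fun hh => h9 hh.1.symm),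
      if_neg (fun hh => h3 hh.1.symm), if_neg (fun hh => h10 hh.1.symm)]

def OkSt (st : List Char) : Prop := st = [] ∨ (∃ c, st = [c]) ∨ st = ['s','h'] ∨ st = ['s','h','c']

lemma loopA_nil : loopA [] = [] := by rw [loopA.eq_def]

lemma loopA_some {ch : Char} {rest dst : List Char} {n : Nat}
    (h : tryMap LATIN_ARMENIAN_MAP (ch :: rest) = some (dst, n)) :
    loopA (ch :: rest) = dst :: loopA (rest.drop (n - 1)) := by
  rw [loopA.eq_def]; simp [h]

lemma loopA_none {ch : Char} {rest : List Char}
    (h : tryMap LATIN_ARMENIAN_MAP (ch :: rest) = none) :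
    loopA (ch :: rest) =
      (match SINGLE_CHAR_MAP.get? [ch] with | some d => d | none => [ch]) :: loopA rest := by
  rw [loopA.eq_def]; simp [h]

lemma stepB_nil (c : Char) : stepB [] c = if c ∈ STARTERS then ([], [c]) else (emit1 [c], []) := by
  simp [stepB]

lemma stepB_one (p : Char) (c : Char) : stepB [p] c =
    (if [p] = ['s'] ∧ c = 'h' then ([], ['s','h'])
     else match DIGRAPHS.get? [p, c] with
       | some d => (d, [])
       | none => (emit1 [p] ++ (stepB [] c).1, (stepB [] c).2)) := by
  simp [stepB]

lemma not_cond_of_not (p c : Char) (h : ¬('s' = p ∧ 'h' = c)) : ¬([p] = ['s'] ∧ c = 'h') := by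
  intro hh
  obtain ⟨hp, hc⟩ := hh
  simp only [List.cons.injEq, and_true] at hp
  exact h ⟨hp.symm, hc.symm⟩

lemma stepB_one_some (p c : Char) (d : List Char) (h : ¬('s' = p ∧ 'h' = c))
    (hd : DIGRAPHS.get? [p, c] = some d) : stepB [p] c = (d, []) := by
  rw [stepB_one, if_neg (not_cond_of_not p c h), hd]

lemma stepB_one_none (p c : Char) (h : ¬('s' = p ∧ 'h' = c))
    (hd : DIGRAPHS.get? [p, c] = none) :
    stepB [p] c = (emit1 [p] ++ (stepB [] c).1, (stepB [] c).2) := by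
  rw [stepB_one, if_neg (not_cond_of_not p c h), hd]

lemma stepB_sh (c : Char) : stepB ['s','h'] c =
    (if c = 'c' then ([], ['s','h','c']) else ('շ' :: (stepB [] c).1, (stepB [] c).2)) := by
  simp [stepB]

lemma stepB_shc (c : Char) : stepB ['s','h','c'] c =
    (if c = 'h' then (['շ','ճ'], []) else ('շ' :: (stepB ['c'] c).1, (stepB ['c'] c).2)) := by
  simp [stepB]

lemma runB_cons (state : List Char) (c : Char) (rest : List Char) :
    runB state (c :: rest) = (stepB state c).1 ++ runB (stepB state c).2 rest := rfl

lemma runB_nil (state : List Char) : runB state [] = flushB state := rfl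

lemma emit1_u : emit1 ['u'] = ['ո', 'ւ'] := by simp [emit1]

lemma emit1_not_u (p : Char) (h : ¬('u' = p)) :
    emit1 [p] = (match SINGLE_CHAR_MAP.get? [p] with | some d => d | none => [p]) := by
  rw [emit1, if_neg (by intro hh; simp only [List.cons.injEq, and_true] at hh; exact h hh.symm)]

lemma runB_loopA : ∀ (n : Nat) (state l : List Char), OkSt state →
    2 * l.length + state.length ≤ n → runB state l = (loopA (state ++ l)).flatten := by
  intro n
  induction n with
  | zero =>
    intro state l hok hl
    have hst : state = [] := by
      rcases hok with rfl | ⟨c, rfl⟩ | rfl | rfl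
      · rfl
      all_goals (simp only [List.length_cons, List.length_nil] at hl; omega)
    have hle : l = [] := by
      cases l with
      | nil => rfl
      | cons c r => subst hst; simp only [List.length_cons, List.length_nil] at hl; omega
    subst hst; subst hle
    rw [runB_nil]
    simp [flushB, loopA_nil]
  | succ n ih =>
    intro state l hok hl
    rcases hok with rfl | ⟨p, rfl⟩ | rfl | rfl
    · -- state = []
      cases l with
      | nil => rw [runB_nil]; simp [flushB, loopA_nil]
      | cons c rest =>
        rw [runB_cons, stepB_nil]
        by_cases hc : c ∈ STARTERS
        · rw [if_pos hc]
          simp only [List.nil_append]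
          have h2 := ih [c] rest (Or.inr (Or.inl ⟨c, rfl⟩))
            (by simp only [List.length_cons, List.length_nil] at hl ⊢; omega)
          simpa using h2
        · rw [if_neg hc]
          simp only [List.nil_append]
          have h2 := ih [] rest (Or.inl rfl)
            (by simp only [List.length_cons, List.length_nil] at hl ⊢; omega)
          simp only [List.nil_append] at h2
          by_cases hu : 'u' = c
          · have h1 := tryMap_head c rest hc
            rw [if_pos hu] at h1
            rw [loopA_some h1, ← hu, emit1_u, h2]
            simp
          · have h1 := tryMap_head c rest hc
            rw [if_neg hu] at h1
            rw [loopA_none h1, List.flatten_cons, emit1_not_u c hu, h2]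
    · -- state = [p]
      cases l with
      | nil =>
        rw [runB_nil, List.append_nil]
        have hf : flushB [p] = emit1 [p] := by simp [flushB]
        rw [hf]
        by_cases hu : 'u' = p
        · have h1 := tryMap_one p
          rw [if_pos hu] at h1
          rw [loopA_some h1, ← hu, emit1_u]
          simp [loopA_nil]
        · have h1 := tryMap_one p
          rw [if_neg hu] at h1
          rw [loopA_none h1, emit1_not_u p hu]
          simp [loopA_nil]
      | cons c rest =>
        by_cases hsh : 's' = p ∧ 'h' = c
        · obtain ⟨hp, hc⟩ := hsh
          subst hp; subst hc
          rw [runB_cons]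
          have hs : stepB ['s'] 'h' = ([], ['s','h']) := by
            rw [stepB_one, if_pos ⟨rfl, rfl⟩]
          rw [hs]
          simp only [List.nil_append]
          have h2 := ih ['s','h'] rest (Or.inr (Or.inr (Or.inl rfl)))
            (by simp only [List.length_cons, List.length_nil] at hl ⊢; omega)
          simpa using h2
        · rcases hd : DIGRAPHS.get? [p, c] with _ | d
          · rw [runB_cons, stepB_one_none p c hsh hd, List.append_assoc, ← runB_cons]
            have h2 := ih [] (c :: rest) (Or.inl rfl)
              (by simp only [List.length_cons, List.length_nil] at hl ⊢; omega)
            simp only [List.nil_append] at h2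
            rw [h2, List.singleton_append]
            by_cases hu : 'u' = p
            · have h1 := tryMap_of_nodig p c rest hsh hd
              rw [if_pos hu] at h1
              rw [loopA_some h1, ← hu, emit1_u]
              simp
            · have h1 := tryMap_of_nodig p c rest hsh hd
              rw [if_neg hu] at h1
              rw [loopA_none h1, List.flatten_cons, emit1_not_u p hu]
          · rw [runB_cons, stepB_one_some p c d hsh hd]
            have h2 := ih [] rest (Or.inl rfl)
              (by simp only [List.length_cons, List.length_nil] at hl ⊢; omega)
            simp only [List.nil_append] at h2
            rw [h2, List.singleton_append, loopA_some (tryMap_of_dig p c rest d hsh hd)]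
            simp
    · -- state = ['s','h']
      cases l with
      | nil =>
        rw [runB_nil, List.append_nil]
        have h1 : tryMap LATIN_ARMENIAN_MAP ['s','h'] = some (['շ'], 2) := rfl
        rw [loopA_some h1]
        simp [flushB, loopA_nil]
      | cons c rest =>
        rw [runB_cons, stepB_sh]
        by_cases hc : c = 'c'
        · subst hc
          rw [if_pos rfl]
          simp only [List.nil_append]
          have h2 := ih ['s','h','c'] rest (Or.inr (Or.inr (Or.inr rfl)))
            (by simp only [List.length_cons, List.length_nil] at hl ⊢; omega)
          simpa using h2
        · rw [if_neg hc, List.cons_append, ← runB_cons]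
          have h2 := ih [] (c :: rest) (Or.inl rfl)
            (by simp only [List.length_cons, List.length_nil] at hl ⊢; omega)
          simp only [List.nil_append] at h2
          rw [h2]
          rw [show (['s','h'] ++ c :: rest) = 's' :: 'h' :: c :: rest from rfl]
          rw [loopA_some (tryMap_sh c rest (fun hh => hc hh.symm))]
          simp
    · -- state = ['s','h','c']
      cases l with
      | nil =>
        rw [runB_nil, List.append_nil]
        have h1 : tryMap LATIN_ARMENIAN_MAP ['s','h','c'] = some (['շ'], 2) := rfl
        rw [loopA_some h1]
        have h2 : tryMap LATIN_ARMENIAN_MAP ['c'] = none := rfl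
        rw [show (['h','c'].drop (2 - 1)) = ['c'] from rfl, loopA_none h2]
        simp [flushB, loopA_nil, emit1, SINGLE_CHAR_MAP, PySem.Dict.get?_mk_cons]
      | cons c rest =>
        rw [runB_cons, stepB_shc]
        by_cases hc : c = 'h'
        · subst hc
          rw [if_pos rfl]
          have h2 := ih [] rest (Or.inl rfl)
            (by simp only [List.length_cons, List.length_nil] at hl ⊢; omega)
          simp only [List.nil_append] at h2
          rw [h2]
          rw [show (['s','h','c'] ++ 'h' :: rest) = 's' :: 'h' :: 'c' :: 'h' :: rest from rfl]
          rw [loopA_some (tryMap_shch rest)]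
          simp
        · rw [if_neg hc, List.cons_append, ← runB_cons]
          have h2 := ih ['c'] (c :: rest) (Or.inr (Or.inl ⟨'c', rfl⟩))
            (by simp only [List.length_cons, List.length_nil] at hl ⊢; omega)
          simp only [List.singleton_append] at h2
          rw [h2]
          rw [show (['s','h','c'] ++ c :: rest) = 's' :: 'h' :: 'c' :: c :: rest from rfl]
          rw [loopA_some (tryMap_shc c rest (fun hh => hc hh.symm))]
          simp

lemma runB_flat (l : List Char) : runB [] l = (loopA l).flatten := by
  simpa using runB_loopA (2 * l.length) [] l (Or.inl rfl) (by simp)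

-- ===== VERDICT =====
theorem transliterate_latin_armenian_spec : Claim_equal_transliterate_latin_armenian := by
  intro text _
  unfold Spec_transliterate_latin_armenian
  unfold transliterate_latin_armenian transliterate_latin_armenian_alt
  simp only [runB_flat, join_nil_flatten]
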